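-- pv_equiv track=rewrite | github.com/tomasvanagas/prime-research | experiments/circuit_complexity/tc0_primality_approaches.py | lucas_U_V
-- ===== SOURCE A (Python) =====
-- def lucas_U_V(n, P, Q):
--     """Compute U_n(P,Q) and V_n(P,Q) mod n using 2x2 matrix powering.
--
--     The Lucas sequence satisfies:
--     [U_{k+1}]   [P  -Q] [U_k]
--     [U_k    ] = [1   0] [U_{k-1}]
--
--     So [U_n, U_{n-1}] = M^{n-1} * [U_1, U_0] where M = [[P, -Q], [1, 0]]
--     U_0 = 0, U_1 = 1, V_0 = 2, V_1 = P
--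
--     This is a 2x2 matrix power, which IS in TC^0 (Mereghetti-Palano 2000).
--     """
--     if n == 0:
--         return 0, 2
--     if n == 1:
--         return 1, P
--
--     # Matrix [[P, -Q], [1, 0]] power via repeated squaring
--     # Track [[a, b], [c, d]] = M^k
--     # Actually easier: use the doubling formulas
--     # U_{2k} = U_k * V_k
--     # V_{2k} = V_k^2 - 2*Q^k
--     # U_{2k+1} = (P*U_{2k} + V_{2k}) / 2  (when P is odd, use mod-2 trick)
--
--     # Use binary method for Lucas sequences
--     U, V, Qk = 1, P, Q
--     # We'll compute mod nothing first, then mod n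
--     # Actually let's just use the matrix method directly mod n
--
--     def mat_mul_mod(A, B, m):
--         return [
--             [(A[0][0]*B[0][0] + A[0][1]*B[1][0]) % m,
--              (A[0][0]*B[0][1] + A[0][1]*B[1][1]) % m],
--             [(A[1][0]*B[0][0] + A[1][1]*B[1][0]) % m,
--              (A[1][0]*B[0][1] + A[1][1]*B[1][1]) % m]
--         ]
--
--     def mat_pow_mod(M, exp, m):
--         result = [[1, 0], [0, 1]]  # identity
--         base = [row[:] for row in M]
--         while exp > 0:
--             if exp % 2 == 1:
--                 result = mat_mul_mod(result, base, m)
--             base = mat_mul_mod(base, base, m)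
--             exp //= 2
--         return result
--
--     M = [[P % n, (-Q) % n], [1, 0]]
--     Mn = mat_pow_mod(M, n - 1, n)
--     # [U_n, U_{n-1}] = M^{n-1} * [1, 0]
--     U_n = Mn[0][0] % n
--     V_n = (P * Mn[0][0] + (-Q) * Mn[1][0] * 2 // P) % n if P != 0 else 0
--
--     # Actually, use the relation V_n = P*U_n - 2*Q*U_{n-1}
--     U_nm1 = Mn[1][0] % n
--     V_n = (P * U_n - 2 * Q * U_nm1) % n
--
--     return U_n, V_n
-- ===== SOURCE B (Python) =====
-- def lucas_U_V(n, P, Q):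
--     """Compute U_n(P,Q) and V_n(P,Q) mod n via Fibonacci-style pair doubling
--     on (U_k, U_{k+1}), walking the bits of n from the most significant down."""
--     if n == 0:
--         return 0, 2
--     if n == 1:
--         return 1, P
--     a, b = 0, 1  # (U_0, U_1)
--     for bit in bin(n)[2:]:
--         # (U_k, U_{k+1}) -> (U_{2k}, U_{2k+1})
--         a, b = (a * (2 * b - P * a)) % n, (b * b - Q * a * a) % n
--         if bit == '1':
--             # (U_{2k}, U_{2k+1}) -> (U_{2k+1}, U_{2k+2})
--             a, b = b, (P * b - Q * a) % n
--     return a, (2 * b - P * a) % n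
-- ===== Notes on version B (the rewrite author's own statement) =====
-- stated objective: alternative
-- what changed: Replaces the 2x2 matrix square-and-multiply (LSB-first, 8 multiplications per squaring/multiplication step) by Fibonacci-style pair doubling on (U_k, U_{k+1}) walking n's bits MSB-first (3 multiplications per doubling), with V_n recovered as 2*U_{n+1} - P*U_n at the end.
-- outside the precondition, e.g. on lucas_U_V(-5, 1, -1): A returns (-4, -4), B returns (0, -4)
import Mathlib
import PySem

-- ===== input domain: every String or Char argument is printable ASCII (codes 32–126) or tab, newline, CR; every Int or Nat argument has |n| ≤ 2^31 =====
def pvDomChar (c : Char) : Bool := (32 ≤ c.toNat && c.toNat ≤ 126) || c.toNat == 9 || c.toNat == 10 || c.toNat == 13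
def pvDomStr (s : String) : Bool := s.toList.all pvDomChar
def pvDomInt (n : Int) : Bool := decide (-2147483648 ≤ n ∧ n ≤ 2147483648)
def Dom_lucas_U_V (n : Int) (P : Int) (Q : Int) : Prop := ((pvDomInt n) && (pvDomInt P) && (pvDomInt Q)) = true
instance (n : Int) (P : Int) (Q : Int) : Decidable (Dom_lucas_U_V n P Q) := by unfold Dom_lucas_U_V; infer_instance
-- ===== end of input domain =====

-- B replaces A's 2x2 matrix square-and-multiply by Fibonacci-style pair doubling on
-- (U_k, U_{k+1}) over n's bits MSB-first (objective: alternative algorithm, fewer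
-- multiplications per bit).

-- ===== PORT A =====
-- matrices [[a,b],[c,d]] are ported as ((a,b),(c,d))
def mat_mul_mod (A B : (Int × Int) × (Int × Int)) (m : Int) : (Int × Int) × (Int × Int) :=
  ((PySem.Int.mod (A.1.1 * B.1.1 + A.1.2 * B.2.1) m,
    PySem.Int.mod (A.1.1 * B.1.2 + A.1.2 * B.2.2) m),
   (PySem.Int.mod (A.2.1 * B.1.1 + A.2.2 * B.2.1) m,
    PySem.Int.mod (A.2.1 * B.1.2 + A.2.2 * B.2.2) m))

-- the `while exp > 0` loop of mat_pow_mod, with its two accumulators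
def mat_pow_loop (result base : (Int × Int) × (Int × Int)) (exp m : Int) :
    (Int × Int) × (Int × Int) :=
  if h : 0 < exp then
    mat_pow_loop (if PySem.Int.mod exp 2 = 1 then mat_mul_mod result base m else result)
      (mat_mul_mod base base m) (PySem.Int.floordiv exp 2) m
  else result
termination_by exp.toNat
decreasing_by
  have h2 : PySem.Int.floordiv exp 2 = exp / 2 := PySem.Int.floordiv_eq_ediv_of_pos (by omega)
  rw [h2]; omega

def mat_pow_mod (M : (Int × Int) × (Int × Int)) (exp m : Int) : (Int × Int) × (Int × Int) :=
  mat_pow_loop ((1, 0), (0, 1)) M exp m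

def lucas_U_V (n : Int) (P : Int) (Q : Int) : Int × Int :=
  if n = 0 then (0, 2)
  else if n = 1 then (1, P)
  else
    let _UVQk := ((1 : Int), P, Q)  -- dead assignment in A, kept for fidelity
    let M : (Int × Int) × (Int × Int) := ((PySem.Int.mod P n, PySem.Int.mod (-Q) n), (1, 0))
    let Mn := mat_pow_mod M (n - 1) n
    let U_n := PySem.Int.mod Mn.1.1 n
    -- A's first, immediately overwritten V_n assignment (dead), kept for fidelity
    let _V_dead := if P ≠ 0 then
        PySem.Int.mod (P * Mn.1.1 + PySem.Int.floordiv ((-Q) * Mn.2.1 * 2) P) n else 0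
    let U_nm1 := PySem.Int.mod Mn.2.1 n
    let V_n := PySem.Int.mod (P * U_n - 2 * Q * U_nm1) n
    (U_n, V_n)

-- ===== PORT B =====
def lucas_step (n P Q : Int) (st : Int × Int) (bit : Bool) : Int × Int :=
  let a := PySem.Int.mod (st.1 * (2 * st.2 - P * st.1)) n
  let b := PySem.Int.mod (st.2 * st.2 - Q * st.1 * st.1) n
  if bit then (b, PySem.Int.mod (P * b - Q * a) n) else (a, b)

def lucas_U_V_alt (n : Int) (P : Int) (Q : Int) : Int × Int :=
  if n = 0 then (0, 2)
  else if n = 1 then (1, P)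
  else
    -- `for bit in bin(n)[2:]` ported as a fold over n's MSB-first bit list; for n < 0
    -- bin(n)[2:] is 'b'+bits(|n|), the 'b' char failing the == '1' test like a false bit
    let bits := if n < 0 then false :: (Nat.bits n.natAbs).reverse
                else (Nat.bits n.toNat).reverse
    let st := List.foldl (lucas_step n P Q) (0, 1) bits
    (st.1, PySem.Int.mod (2 * st.2 - P * st.1) n)

-- ===== PRECONDITION & SPEC =====
-- Pre_ restricts to the natural domain n ≥ 0: a negative modulus/index is outside the
-- function's purpose, and A's value there ((1 % n, P % n), leftover loop state of an
-- exponent loop that never runs) is accidental.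
def Pre_lucas_U_V (n : Int) (P : Int) (Q : Int) : Prop := 0 ≤ n
instance (n : Int) (P : Int) (Q : Int) : Decidable (Pre_lucas_U_V n P Q) := by
  unfold Pre_lucas_U_V; infer_instance
def pvWitness_lucas_U_V : Int × Int × Int := (7, 1, -1)

def Spec_lucas_U_V (n : Int) (P : Int) (Q : Int) (out : Int × Int) : Prop := out = lucas_U_V_alt n P Q
instance (n : Int) (P : Int) (Q : Int) (out : Int × Int) : Decidable (Spec_lucas_U_V n P Q out) := by unfold Spec_lucas_U_V; infer_instance

-- ===== CLAIM (what is proved, stated in full; the proofs are below) =====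
def Claim_equal_lucas_U_V : Prop := ∀ (n : Int) (P : Int) (Q : Int), Dom_lucas_U_V n P Q → Pre_lucas_U_V n P Q → Spec_lucas_U_V n P Q (lucas_U_V n P Q)

-- ===== LEMMAS AND PROOFS =====

-- the mathematical Lucas sequence U_k(P,Q)
def uSeq (P Q : Int) : Nat → Int
  | 0 => 0
  | 1 => 1
  | k + 2 => P * uSeq P Q (k + 1) - Q * uSeq P Q k

theorem uSeq_rec (P Q : Int) (k : Nat) :
    uSeq P Q (k + 2) = P * uSeq P Q (k + 1) - Q * uSeq P Q k := rfl

-- addition formula for U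
theorem uSeq_add (P Q : Int) (s r : Nat) :
    uSeq P Q (r + s) =
      uSeq P Q r * uSeq P Q (s + 1) + uSeq P Q (r + 1) * uSeq P Q s
        - P * (uSeq P Q r * uSeq P Q s) := by
  induction s generalizing r with
  | zero => simp [uSeq]
  | succ s ih =>
    have h2 : r + (s + 1) = (r + 1) + s := by omega
    rw [h2, ih (r + 1)]
    simp only [show r + 1 + 1 = r + 2 from rfl, show s + 1 + 1 = s + 2 from rfl,
      uSeq_rec]
    ring

-- mod-n reasoning through ZMod n.toNat
theorem zmod_emod_eq {n : Int} (hn : 0 < n) {X Y : Int}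
    (h : (X : ZMod n.toNat) = (Y : ZMod n.toNat)) : X % n = Y % n := by
  have hmn : ((n.toNat : Int)) = n := Int.toNat_of_nonneg hn.le
  have h2 := (ZMod.intCast_eq_intCast_iff X Y n.toNat).mp h
  rw [hmn] at h2
  exact h2

theorem cast_emod {n : Int} (hn : 0 < n) (x : Int) :
    (((x % n : Int)) : ZMod n.toNat) = (x : ZMod n.toNat) := by
  have hmn : ((n.toNat : Int)) = n := Int.toNat_of_nonneg hn.le
  rw [ZMod.intCast_eq_intCast_iff, hmn]
  exact Int.emod_emod_of_dvd x dvd_rfl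

-- (U_e mod n, (U_{e+1} - P·U_e) mod n): the coefficient pair of M^e = U_e·M + (…)·I
def phiP (n P Q : Int) (e : Nat) : Int × Int :=
  (uSeq P Q e % n, (uSeq P Q (e + 1) - P * uSeq P Q e) % n)

-- the matrix a·M + b·I reduced mod n, for M = [[P,-Q],[1,0]]
def mrep (n P Q : Int) (p : Int × Int) : (Int × Int) × (Int × Int) :=
  (((p.1 * P + p.2) % n, (-(p.1 * Q)) % n), (p.1 % n, p.2 % n))

theorem mat_mul_phi (n P Q : Int) (hn : 0 < n) (r s : Nat) :
    mat_mul_mod (mrep n P Q (phiP n P Q r)) (mrep n P Q (phiP n P Q s)) n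
      = mrep n P Q (phiP n P Q (r + s)) := by
  have hA := congrArg (fun z : Int => (z : ZMod n.toNat)) (uSeq_add P Q s r)
  have hB := congrArg (fun z : Int => (z : ZMod n.toNat)) (uSeq_add P Q (s + 1) r)
  have hC := congrArg (fun z : Int => (z : ZMod n.toNat)) (uSeq_rec P Q s)
  rw [show r + (s + 1) = r + s + 1 from rfl] at hB
  push_cast at hA hB hC
  simp only [mat_mul_mod, mrep, phiP, PySem.Int.mod_eq_emod_of_pos hn]
  refine Prod.ext (Prod.ext ?_ ?_) (Prod.ext ?_ ?_) <;>
    [skip; skip; skip; skip] <;> simp only [] <;>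
    apply zmod_emod_eq hn <;> push_cast [cast_emod hn]
  · linear_combination -hB - (uSeq P Q r : ZMod n.toNat) * hC
  · linear_combination (Q : ZMod n.toNat) * hA
  · linear_combination -hA
  · linear_combination -hB - (uSeq P Q r : ZMod n.toNat) * hC + (P : ZMod n.toNat) * hA

theorem mat_pow_loop_phi (n P Q : Int) (hn : 0 < n) (e : Nat) : ∀ r s : Nat,
    mat_pow_loop (mrep n P Q (phiP n P Q r)) (mrep n P Q (phiP n P Q s)) (e : Int) n
      = mrep n P Q (phiP n P Q (r + s * e)) := by
  induction e using Nat.strong_induction_on with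
  | _ e ih =>
    intro r s
    rw [mat_pow_loop]
    by_cases he : e = 0
    · subst he; simp
    · have hpos : (0 : Int) < (e : Int) := by
        exact_mod_cast Nat.pos_of_ne_zero he
      rw [dif_pos hpos]
      have hmod : PySem.Int.mod (e : Int) 2 = ((e % 2 : Nat) : Int) := by
        rw [PySem.Int.mod_eq_emod_of_pos (by norm_num)]; omega
      have hdiv : PySem.Int.floordiv (e : Int) 2 = ((e / 2 : Nat) : Int) := by
        rw [PySem.Int.floordiv_eq_ediv_of_pos (by norm_num)]; omega
      have hlt : e / 2 < e := Nat.div_lt_self (Nat.pos_of_ne_zero he) one_lt_two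
      rw [hmod, hdiv]
      rcases Nat.mod_two_eq_zero_or_one e with hpar | hpar
      · have h2 : 2 * (e / 2) = e := by omega
        have harith : r + (s + s) * (e / 2) = r + s * e := by
          calc r + (s + s) * (e / 2) = r + s * (2 * (e / 2)) := by ring
            _ = r + s * e := by rw [h2]
        rw [hpar]
        rw [if_neg (by norm_num)]
        rw [mat_mul_phi n P Q hn s s, ih (e / 2) hlt r (s + s), harith]
      · have h2 : 2 * (e / 2) + 1 = e := by omega
        have harith : r + s + (s + s) * (e / 2) = r + s * e := by
          calc r + s + (s + s) * (e / 2) = r + s * (2 * (e / 2) + 1) := by ring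
            _ = r + s * e := by rw [h2]
        rw [hpar]
        rw [if_pos (by norm_num)]
        rw [mat_mul_phi n P Q hn r s, mat_mul_phi n P Q hn s s,
          ih (e / 2) hlt (r + s) (s + s), harith]

def valBits (k : Nat) (bs : List Bool) : Nat :=
  bs.foldl (fun k b => 2 * k + cond b 1 0) k

theorem bfold_phi (n P Q : Int) (hn : 0 < n) (bs : List Bool) : ∀ k : Nat,
    List.foldl (lucas_step n P Q) (uSeq P Q k % n, uSeq P Q (k + 1) % n) bs
      = (uSeq P Q (valBits k bs) % n, uSeq P Q (valBits k bs + 1) % n) := by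
  induction bs with
  | nil => intro k; simp [valBits]
  | cons b bs ih =>
    intro k
    have hstep : lucas_step n P Q (uSeq P Q k % n, uSeq P Q (k + 1) % n) b
        = (uSeq P Q (2 * k + cond b 1 0) % n, uSeq P Q (2 * k + cond b 1 0 + 1) % n) := by
      have hdbl : (uSeq P Q k % n * (2 * (uSeq P Q (k + 1) % n) - P * (uSeq P Q k % n))) % n
          = uSeq P Q (2 * k) % n := by
        apply zmod_emod_eq hn
        have h1 := congrArg (fun z : Int => (z : ZMod n.toNat)) (uSeq_add P Q k k)
        push_cast [cast_emod hn] at h1 ⊢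
        rw [show k + k = 2 * k from by omega] at h1
        linear_combination -h1
      have hdbl1 : ((uSeq P Q (k + 1) % n) * (uSeq P Q (k + 1) % n)
            - Q * (uSeq P Q k % n) * (uSeq P Q k % n)) % n
          = uSeq P Q (2 * k + 1) % n := by
        apply zmod_emod_eq hn
        have h1 := congrArg (fun z : Int => (z : ZMod n.toNat)) (uSeq_add P Q (k + 1) k)
        have h3 := congrArg (fun z : Int => (z : ZMod n.toNat)) (uSeq_rec P Q k)
        push_cast [cast_emod hn] at h1 h3 ⊢
        rw [show k + (k + 1) = 2 * k + 1 from by omega] at h1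
        linear_combination -h1 - (uSeq P Q k : ZMod n.toNat) * h3
      cases b with
      | false => simp [lucas_step, PySem.Int.mod_eq_emod_of_pos hn, hdbl, hdbl1]
      | true =>
        simp only [lucas_step, PySem.Int.mod_eq_emod_of_pos hn, hdbl, hdbl1, if_true, cond]
        refine Prod.ext rfl ?_
        show (P * (uSeq P Q (2 * k + 1) % n) - Q * (uSeq P Q (2 * k) % n)) % n
            = uSeq P Q (2 * k + 1 + 1) % n
        apply zmod_emod_eq hn
        have h3 := congrArg (fun z : Int => (z : ZMod n.toNat)) (uSeq_rec P Q (2 * k))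
        push_cast [cast_emod hn] at h3 ⊢
        linear_combination -h3
    rw [List.foldl_cons, hstep]
    have := ih (2 * k + cond b 1 0)
    rw [this]
    simp [valBits]

theorem foldr_bits (m : Nat) :
    (Nat.bits m).foldr (fun b k => 2 * k + cond b 1 0) 0 = m := by
  induction m using Nat.binaryRec' with
  | zero => simp
  | bit b m h ih =>
    rw [Nat.bits_append_bit m b h]
    simp only [List.foldr_cons, ih]
    cases b <;> simp [Nat.bit]

theorem bits_val (m : Nat) : valBits 0 (Nat.bits m).reverse = m := by
  unfold valBits
  rw [List.foldl_reverse]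
  exact foldr_bits m

-- ===== VERDICT (by name: the statement is the Claim_ definition above) =====
theorem lucas_U_V_spec : Claim_equal_lucas_U_V := by
  intro n P Q _ hpre
  unfold Spec_lucas_U_V
  have hpre' : 0 ≤ n := hpre
  by_cases h0 : n = 0
  · subst h0; rfl
  by_cases h1 : n = 1
  · subst h1; rfl
  have hn : 0 < n := by omega
  have hn2 : 2 ≤ n := by omega
  have h1n : (1 : Int) % n = 1 := Int.emod_eq_of_lt (by norm_num) (by omega)
  have hm : ((((n - 1).toNat) : Int)) = n - 1 := Int.toNat_of_nonneg (by omega)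
  have hI : ((((1 : Int), (0 : Int)), ((0 : Int), (1 : Int))) : (Int × Int) × (Int × Int))
      = mrep n P Q (phiP n P Q 0) := by
    simp [mrep, phiP, uSeq, h1n]
  have hM : ((PySem.Int.mod P n, PySem.Int.mod (-Q) n), ((1 : Int), (0 : Int)))
      = mrep n P Q (phiP n P Q 1) := by
    simp [mrep, phiP, uSeq, h1n, PySem.Int.mod_eq_emod_of_pos hn]
  have hB0 : (((0 : Int), (1 : Int)) : Int × Int)
      = (uSeq P Q 0 % n, uSeq P Q (0 + 1) % n) := by
    simp [uSeq, h1n]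
  have htm : n.toNat = (n - 1).toNat + 1 := by omega
  simp only [lucas_U_V, lucas_U_V_alt, if_neg h0, if_neg h1, mat_pow_mod]
  rw [hI, hM, show n - 1 = (((n - 1).toNat : Nat) : Int) from hm.symm,
    mat_pow_loop_phi n P Q hn ((n - 1).toNat) 0 1, hB0,
    bfold_phi n P Q hn _ 0, if_neg (show ¬ n < 0 from by omega), bits_val n.toNat, htm]
  set k := (n - 1).toNat with hk
  have hUn : PySem.Int.mod (mrep n P Q (phiP n P Q (0 + 1 * k))).1.1 n
      = uSeq P Q (k + 1) % n := by
    simp only [Nat.zero_add, Nat.one_mul, mrep, phiP, PySem.Int.mod_eq_emod_of_pos hn]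
    apply zmod_emod_eq hn
    push_cast [cast_emod hn]
    ring
  have hUnm1 : PySem.Int.mod (mrep n P Q (phiP n P Q (0 + 1 * k))).2.1 n
      = uSeq P Q k % n := by
    simp only [Nat.zero_add, Nat.one_mul, mrep, phiP, PySem.Int.mod_eq_emod_of_pos hn]
    apply zmod_emod_eq hn
    push_cast [cast_emod hn]
    ring
  refine Prod.ext hUn ?_
  show PySem.Int.mod (P * PySem.Int.mod (mrep n P Q (phiP n P Q (0 + 1 * k))).1.1 n
      - 2 * Q * PySem.Int.mod (mrep n P Q (phiP n P Q (0 + 1 * k))).2.1 n) n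
    = PySem.Int.mod (2 * (uSeq P Q (k + 1 + 1) % n) - P * (uSeq P Q (k + 1) % n)) n
  rw [hUn, hUnm1]
  simp only [PySem.Int.mod_eq_emod_of_pos hn]
  apply zmod_emod_eq hn
  have hrec := congrArg (fun z : Int => (z : ZMod n.toNat)) (uSeq_rec P Q k)
  push_cast [cast_emod hn] at hrec ⊢
  linear_combination -2 * hrec
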